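-- pv_equiv track=rewrite | github.com/GuilinXie/LeetcodePython | Python/DFS/maxIsland.py | getMaxIsland
-- ===== SOURCE A (Python) =====
-- def getMaxIsland(A):
--     if len(A) <= 0 or len(A[0]) <= 0:
--         return 0
--     r, c = len(A), len(A[0])
--     visited = set()
--     res = 0
--     for i in range(r):
--         for j in range(c):
--             if (i, j) not in visited:
--                 tmp_res = dfs(A, i, j, visited)
--                 if tmp_res > res:
--                     res = tmp_res
--     return res
--
-- def dfs(A, i, j, visited):
--     if i < 0 or i >= len(A) or j < 0 or j >= len(A[0]) or ((i, j) in visited) or A[i][j] != "o":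
--         return 0
--     visited.add((i, j))
--     neighbors = [(i - 1, j), (i + 1, j), (i, j - 1), (i, j + 1),\
--                  (i - 1, j - 1), (i - 1, j + 1), (i + 1, j - 1),\
--                  (i + 1, j + 1)]
--     # need to use size to store the sum of all neighbors
--     # not return 1 + dfs(A, new_i, new_j, visited) directly
--     size = 1
--     for new_i, new_j in neighbors:
--         size += dfs(A, new_i, new_j, visited)
--     return size
-- ===== SOURCE B (Python) =====
-- def getMaxIsland(A):
--     if len(A) <= 0 or len(A[0]) <= 0:
--         return 0
--     r, c = len(A), len(A[0])
--     visited = set()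
--     res = 0
--     for i in range(r):
--         for j in range(c):
--             if (i, j) not in visited and A[i][j] == "o":
--                 visited.add((i, j))
--                 size = 0
--                 stack = [(i, j)]
--                 while stack:
--                     x, y = stack.pop()
--                     size += 1
--                     for dx in (-1, 0, 1):
--                         for dy in (-1, 0, 1):
--                             if dx != 0 or dy != 0:
--                                 nx, ny = x + dx, y + dy
--                                 if 0 <= nx < r and 0 <= ny < c and (nx, ny) not in visited and A[nx][ny] == "o":
--                                     visited.add((nx, ny))
--                                     stack.append((nx, ny))
--                 if size > res:
--                     res = size
--     return res
-- ===== Notes on version B (the rewrite author's own statement) =====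
-- stated objective: faster
-- what changed: The recursive 8-way DFS helper (which recurses even into out-of-bounds, visited and non-'o' cells) is replaced by an iterative flood fill with an explicit stack that marks cells when pushed, counts pops, and is only started from unvisited 'o' cells.
import Mathlib
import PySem

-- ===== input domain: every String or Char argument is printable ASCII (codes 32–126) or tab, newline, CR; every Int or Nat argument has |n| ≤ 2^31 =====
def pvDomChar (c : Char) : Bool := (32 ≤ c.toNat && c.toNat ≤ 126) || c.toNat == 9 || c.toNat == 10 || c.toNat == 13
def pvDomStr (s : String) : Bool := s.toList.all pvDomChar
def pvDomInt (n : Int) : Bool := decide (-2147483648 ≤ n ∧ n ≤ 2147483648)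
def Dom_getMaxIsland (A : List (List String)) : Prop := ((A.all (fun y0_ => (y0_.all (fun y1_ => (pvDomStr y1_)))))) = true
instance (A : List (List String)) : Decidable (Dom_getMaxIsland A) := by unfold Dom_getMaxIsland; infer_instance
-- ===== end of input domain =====

-- B replaces A's recursive 8-way DFS helper by an iterative stack flood fill (mark on push,
-- count pops) started only from unvisited 'o' cells; equivalence of the returned maximum is proved.


-- ===== PORT A =====

-- A[i][j]; total form of the indexing (exact under Pre_: 0 ≤ i < len A, 0 ≤ j < len (A i))
def pvCell (A : List (List String)) (i j : Int) : String :=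
  PySem.List.pyGetD (PySem.List.pyGetD A i []) j ""

-- the `neighbors` list of A, in A's order
def pvNbrsA (i j : Int) : List (Int × Int) :=
  [(i - 1, j), (i + 1, j), (i, j - 1), (i, j + 1),
   (i - 1, j - 1), (i - 1, j + 1), (i + 1, j - 1), (i + 1, j + 1)]

-- literal port of `dfs`, with a fuel guard for totality only (the fuel passed by
-- getMaxIsland is proven sufficient: the zero case is never reached from there)
def pvDfs (A : List (List String)) (r c : Int) :
    Nat → Int → Int → PySem.Set (Int × Int) → PySem.Set (Int × Int) × Int
  | 0, _, _, vis => (vis, 0)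
  | f + 1, i, j, vis =>
    if i < 0 ∨ r ≤ i ∨ j < 0 ∨ c ≤ j ∨ (i, j) ∈ vis ∨ pvCell A i j ≠ "o" then (vis, 0)
    else
      (pvNbrsA i j).foldl
        (fun st p =>
          let res := pvDfs A r c f p.1 p.2 st.1
          (res.1, st.2 + res.2))
        (PySem.Set.add vis (i, j), 1)

def getMaxIsland (A : List (List String)) : Int :=
  if A.length ≤ 0 ∨ (A.headD []).length ≤ 0 then 0
  else
    let r : Int := A.length
    let c : Int := (A.headD []).length
    let st :=
      (PySem.List.pyRange 0 r 1).foldl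
        (fun st i =>
          (PySem.List.pyRange 0 c 1).foldl
            (fun st j =>
              if (i, j) ∉ st.1 then
                let tmp := pvDfs A r c (A.length * (A.headD []).length + 1) i j st.1
                (tmp.1, if tmp.2 > st.2 then tmp.2 else st.2)
              else st)
            st)
        (((PySem.Set.empty : PySem.Set (Int × Int)), (0 : Int)))
    st.2

-- ===== PORT B =====

-- all (dx, dy) pairs of B's double loop, in loop order; the (0,0) skip is inside the step
def pvDeltas : List (Int × Int) :=
  [(-1, -1), (-1, 0), (-1, 1), (0, -1), (0, 0), (0, 1), (1, -1), (1, 0), (1, 1)]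

-- one iteration of B's inner dx/dy loop: maybe mark and push the neighbor (x+dx, y+dy)
def pvPush (A : List (List String)) (r c x y : Int)
    (st : PySem.Set (Int × Int) × List (Int × Int)) (d : Int × Int) :
    PySem.Set (Int × Int) × List (Int × Int) :=
  if d.1 ≠ 0 ∨ d.2 ≠ 0 then
    if 0 ≤ x + d.1 ∧ x + d.1 < r ∧ 0 ≤ y + d.2 ∧ y + d.2 < c ∧
        (x + d.1, y + d.2) ∉ st.1 ∧ pvCell A (x + d.1) (y + d.2) = "o" then
      (PySem.Set.add st.1 (x + d.1, y + d.2), (x + d.1, y + d.2) :: st.2)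
    else st
  else st

-- cells of the r×c grid (termination measure bookkeeping for pvFlood)
def pvGridCells (r c : Int) : List (Int × Int) :=
  (List.range r.toNat).flatMap (fun i => (List.range c.toNat).map (fun j => ((i : Int), (j : Int))))

-- number of grid cells not yet visited
def pvUnvis (r c : Int) (vis : List (Int × Int)) : Nat :=
  (pvGridCells r c).countP (fun p => decide (p ∉ vis))

lemma pv_countP_lt {α : Type} (P Q : α → Bool) (himp : ∀ x, Q x = true → P x = true)
    (a : α) (l : List α) (ha : a ∈ l) (hPa : P a = true) (hQa : ¬ Q a = true) :
    l.countP Q < l.countP P := by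
  induction l with
  | nil => cases ha
  | cons b l ih =>
    rcases List.mem_cons.mp ha with rfl | hb
    · have hmono := List.countP_mono_left (l := l) (p := Q) (q := P) (fun x _ => himp x)
      simp only [List.countP_cons, hPa, hQa]
      simp
      omega
    · have := ih hb
      have hhead : (if Q b then 1 else 0) ≤ (if P b then 1 else 0) := by
        by_cases hq : Q b = true
        · simp [hq, himp b hq]
        · simp [hq]
      simp only [List.countP_cons]
      split_ifs at hhead ⊢ <;> omega

lemma mem_pvGridCells (r c : Int) (p : Int × Int) :
    p ∈ pvGridCells r c ↔ 0 ≤ p.1 ∧ p.1 < r ∧ 0 ≤ p.2 ∧ p.2 < c := by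
  obtain ⟨p1, p2⟩ := p
  simp [pvGridCells, Prod.ext_iff]
  constructor
  · rintro ⟨⟨i, hi, rfl⟩, ⟨j, hj, rfl⟩⟩
    omega
  · rintro ⟨h1, h2, h3, h4⟩
    exact ⟨⟨p1.toNat, by omega, by omega⟩, ⟨p2.toNat, by omega, by omega⟩⟩

lemma pvUnvis_add_lt (r c : Int) (vis : List (Int × Int)) (p : Int × Int)
    (hg : p ∈ pvGridCells r c) (hp : p ∉ vis) :
    pvUnvis r c (PySem.Set.add vis p) < pvUnvis r c vis := by
  refine pv_countP_lt _ _ ?_ p _ hg ?_ ?_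
  · intro x hx
    simp only [decide_eq_true_eq, PySem.Set.mem_add] at hx ⊢
    exact fun hxv => hx (Or.inl hxv)
  · simpa using hp
  · simp [PySem.Set.mem_add]

-- growth bookkeeping of B's push loop, used for pvFlood's termination
lemma pvPushFold_growth (A : List (List String)) (r c x y : Int) :
    ∀ (ds : List (Int × Int)) (vis : PySem.Set (Int × Int)) (stk : List (Int × Int)),
      ∃ k, (ds.foldl (pvPush A r c x y) (vis, stk)).2.length = stk.length + k ∧
        pvUnvis r c (ds.foldl (pvPush A r c x y) (vis, stk)).1 + k ≤ pvUnvis r c vis := by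
  intro ds
  induction ds with
  | nil => intro vis stk; exact ⟨0, by simp⟩
  | cons d ds ih =>
    intro vis stk
    simp only [List.foldl_cons]
    by_cases h1 : d.1 ≠ 0 ∨ d.2 ≠ 0
    · by_cases h2 : 0 ≤ x + d.1 ∧ x + d.1 < r ∧ 0 ≤ y + d.2 ∧ y + d.2 < c ∧
          (x + d.1, y + d.2) ∉ vis ∧ pvCell A (x + d.1) (y + d.2) = "o"
      · have hstep : pvPush A r c x y (vis, stk) d =
            (PySem.Set.add vis (x + d.1, y + d.2), (x + d.1, y + d.2) :: stk) := by
          simp [pvPush, h1, h2]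
        rw [hstep]
        obtain ⟨k, hl, hu⟩ := ih (PySem.Set.add vis (x + d.1, y + d.2)) ((x + d.1, y + d.2) :: stk)
        have hlt : pvUnvis r c (PySem.Set.add vis (x + d.1, y + d.2)) < pvUnvis r c vis := by
          apply pvUnvis_add_lt
          · rw [mem_pvGridCells]; exact ⟨h2.1, h2.2.1, h2.2.2.1, h2.2.2.2.1⟩
          · exact h2.2.2.2.2.1
        refine ⟨k + 1, ?_, by omega⟩
        rw [hl]
        simp only [List.length_cons]
        omega
      · have hstep : pvPush A r c x y (vis, stk) d = (vis, stk) := by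
          simp only [pvPush, if_pos h1]
          rw [if_neg h2]
        rw [hstep]
        exact ih vis stk
    · have hstep : pvPush A r c x y (vis, stk) d = (vis, stk) := by
        simp [pvPush, h1]
      rw [hstep]
      exact ih vis stk

-- B's while-loop: pop a cell (head = top of stack), count it, push unvisited valid neighbors
def pvFlood (A : List (List String)) (r c : Int) :
    List (Int × Int) → PySem.Set (Int × Int) → Int → PySem.Set (Int × Int) × Int
  | [], vis, size => (vis, size)
  | (x, y) :: rest, vis, size =>
    let st := pvDeltas.foldl (pvPush A r c x y) (vis, rest)
    pvFlood A r c st.2 st.1 (size + 1)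
termination_by stack vis _ => 9 * pvUnvis r c vis + stack.length
decreasing_by
  obtain ⟨k, hlen, hu⟩ := pvPushFold_growth A r c x y pvDeltas vis rest
  simp only [List.length_cons]
  omega

def getMaxIsland_alt (A : List (List String)) : Int :=
  if A.length ≤ 0 ∨ (A.headD []).length ≤ 0 then 0
  else
    let r : Int := A.length
    let c : Int := (A.headD []).length
    let st :=
      (PySem.List.pyRange 0 r 1).foldl
        (fun st i =>
          (PySem.List.pyRange 0 c 1).foldl
            (fun st j =>
              if (i, j) ∉ st.1 ∧ pvCell A i j = "o" then
                let fl := pvFlood A r c [(i, j)] (PySem.Set.add st.1 (i, j)) 0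
                (fl.1, if fl.2 > st.2 then fl.2 else st.2)
              else st)
            st)
        (((PySem.Set.empty : PySem.Set (Int × Int)), (0 : Int)))
    st.2

-- ===== PRECONDITION & SPEC =====

-- Pre_ excludes exactly the ragged grids on which Python A raises IndexError: a row
-- shorter than row 0 (dfs reads A[i][j] for every j < len(A[0])).
def Pre_getMaxIsland (A : List (List String)) : Prop :=
  ∀ row ∈ A, (A.headD []).length ≤ row.length

instance (A : List (List String)) : Decidable (Pre_getMaxIsland A) := by
  unfold Pre_getMaxIsland; infer_instance

def pvWitness_getMaxIsland : List (List String) :=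
  [["o", "x", "o"], ["o", "o", "x"], ["x", "x", "o"]]

def Spec_getMaxIsland (A : List (List String)) (out : Int) : Prop := out = getMaxIsland_alt A
instance (A : List (List String)) (out : Int) : Decidable (Spec_getMaxIsland A out) := by
  unfold Spec_getMaxIsland; infer_instance

-- ===== CLAIM (what is proved, stated in full; the proofs are below) =====
def Claim_equal_getMaxIsland : Prop :=
  ∀ (A : List (List String)), Dom_getMaxIsland A → Pre_getMaxIsland A →
    Spec_getMaxIsland A (getMaxIsland A)

-- ===== LEMMAS AND PROOFS =====

def pvValid (A : List (List String)) (r c : Int) (p : Int × Int) : Prop :=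
  0 ≤ p.1 ∧ p.1 < r ∧ 0 ≤ p.2 ∧ p.2 < c ∧ pvCell A p.1 p.2 = "o"

def pvAdj (p q : Int × Int) : Prop := q ∈ pvNbrsA p.1 p.2

-- cells reachable from p0 through valid, initially-unvisited cells (8-adjacency)
inductive pvReach (A : List (List String)) (r c : Int) (vis : List (Int × Int)) (p0 : Int × Int) :
    Int × Int → Prop
  | base : pvValid A r c p0 → p0 ∉ vis → pvReach A r c vis p0 p0
  | step {p q : Int × Int} : pvReach A r c vis p0 p → pvAdj p q → pvValid A r c q →
      q ∉ vis → pvReach A r c vis p0 q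

lemma pvUnvis_le_of_subset (r c : Int) (v v' : List (Int × Int))
    (h : ∀ x ∈ v, x ∈ v') : pvUnvis r c v' ≤ pvUnvis r c v := by
  apply List.countP_mono_left
  intro x _
  simp only [decide_eq_true_eq]
  intro hx hxv
  exact hx (h x hxv)

-- ---- generic set facts ----

lemma pv_mem_add (s : List (Int × Int)) (x y : Int × Int) :
    x ∈ PySem.Set.add s y ↔ x ∈ s ∨ x = y := PySem.Set.mem_add s y x

lemma pv_length_add (s : List (Int × Int)) (y : Int × Int) (h : y ∉ s) :
    (PySem.Set.add s y).length = s.length + 1 := by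
  rw [PySem.Set.add_of_not_mem h]
  simp

-- ---- unfolding lemmas for the ports ----

def pvStepA (A : List (List String)) (r c : Int) (f : Nat) :
    PySem.Set (Int × Int) × Int → Int × Int → PySem.Set (Int × Int) × Int :=
  fun st p =>
    let res := pvDfs A r c f p.1 p.2 st.1
    (res.1, st.2 + res.2)

lemma pvDfs_succ (A : List (List String)) (r c : Int) (f : Nat) (i j : Int)
    (vis : PySem.Set (Int × Int)) :
    pvDfs A r c (f + 1) i j vis =
      if i < 0 ∨ r ≤ i ∨ j < 0 ∨ c ≤ j ∨ (i, j) ∈ vis ∨ pvCell A i j ≠ "o" then (vis, 0)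
      else (pvNbrsA i j).foldl (pvStepA A r c f) (PySem.Set.add vis (i, j), 1) := rfl

lemma pvDfs_guard (A : List (List String)) (r c : Int) (f : Nat) (i j : Int)
    (vis : PySem.Set (Int × Int))
    (h : i < 0 ∨ r ≤ i ∨ j < 0 ∨ c ≤ j ∨ (i, j) ∈ vis ∨ pvCell A i j ≠ "o") :
    pvDfs A r c f i j vis = (vis, 0) := by
  cases f with
  | zero => rfl
  | succ f => rw [pvDfs_succ, if_pos h]

lemma pvFlood_nil (A : List (List String)) (r c : Int) (vis : PySem.Set (Int × Int)) (size : Int) :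
    pvFlood A r c [] vis size = (vis, size) := by
  rw [pvFlood]

lemma pvFlood_cons (A : List (List String)) (r c x y : Int) (rest : List (Int × Int))
    (vis : PySem.Set (Int × Int)) (size : Int) :
    pvFlood A r c ((x, y) :: rest) vis size =
      pvFlood A r c (pvDeltas.foldl (pvPush A r c x y) (vis, rest)).2
        (pvDeltas.foldl (pvPush A r c x y) (vis, rest)).1 (size + 1) := by
  rw [pvFlood]

-- ---- A-side loop lemmas ----

lemma pvFoldA_mono (A : List (List String)) (r c : Int) (f : Nat)
    (hm : ∀ (i j : Int) (vis : PySem.Set (Int × Int)) (x : Int × Int),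
      x ∈ vis → x ∈ (pvDfs A r c f i j vis).1) :
    ∀ (ps : List (Int × Int)) (st : PySem.Set (Int × Int) × Int) (x : Int × Int),
      x ∈ st.1 → x ∈ (ps.foldl (pvStepA A r c f) st).1 := by
  intro ps
  induction ps with
  | nil => intro st x hx; exact hx
  | cons p ps ihp =>
    intro st x hx
    exact ihp _ x (hm p.1 p.2 st.1 x hx)

lemma pvDfs_mono (A : List (List String)) (r c : Int) :
    ∀ (f : Nat) (i j : Int) (vis : PySem.Set (Int × Int)) (x : Int × Int),
      x ∈ vis → x ∈ (pvDfs A r c f i j vis).1 := by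
  intro f
  induction f with
  | zero => intro i j vis x hx; exact hx
  | succ f ih =>
    intro i j vis x hx
    rw [pvDfs_succ]
    split_ifs with h
    · exact hx
    · exact pvFoldA_mono A r c f ih _ _ x (pv_mem_add vis x (i, j) |>.mpr (Or.inl hx))

lemma pvDfs_nodup (A : List (List String)) (r c : Int) :
    ∀ (f : Nat) (i j : Int) (vis : PySem.Set (Int × Int)),
      vis.Nodup → (pvDfs A r c f i j vis).1.Nodup := by
  intro f
  induction f with
  | zero => intro i j vis h; exact h
  | succ f ih =>
    intro i j vis h
    rw [pvDfs_succ]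
    split_ifs with hg
    · exact h
    · have : ∀ (ps : List (Int × Int)) (st : PySem.Set (Int × Int) × Int),
          st.1.Nodup → (ps.foldl (pvStepA A r c f) st).1.Nodup := by
        intro ps
        induction ps with
        | nil => intro st hst; exact hst
        | cons p ps ihp => intro st hst; exact ihp _ (ih p.1 p.2 st.1 hst)
      exact this _ (PySem.Set.add vis (i, j), 1) (by dsimp only; exact PySem.Set.nodup_add _ _ h)

lemma pvDfs_size (A : List (List String)) (r c : Int) :
    ∀ (f : Nat) (i j : Int) (vis : PySem.Set (Int × Int)),
      ((pvDfs A r c f i j vis).1.length : Int) = vis.length + (pvDfs A r c f i j vis).2 := by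
  intro f
  induction f with
  | zero => intro i j vis; simp [pvDfs]
  | succ f ih =>
    intro i j vis
    rw [pvDfs_succ]
    split_ifs with hg
    · simp
    · have hnv : (i, j) ∉ vis := by
        intro hmem
        exact hg (Or.inr (Or.inr (Or.inr (Or.inr (Or.inl hmem)))))
      have hfold : ∀ (ps : List (Int × Int)) (st : PySem.Set (Int × Int) × Int),
          ((ps.foldl (pvStepA A r c f) st).1.length : Int) - (ps.foldl (pvStepA A r c f) st).2 =
            (st.1.length : Int) - st.2 := by
        intro ps
        induction ps with
        | nil => intro st; rfl
        | cons p ps ihp =>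
          intro st
          rw [List.foldl_cons, ihp]
          have := ih p.1 p.2 st.1
          simp only [pvStepA]
          omega
      have := hfold (pvNbrsA i j) (PySem.Set.add vis (i, j), 1)
      dsimp only at this ⊢
      have hlen := pv_length_add vis (i, j) hnv
      omega

-- ---- reachability facts ----

lemma pvReach_not_vis {A : List (List String)} {r c : Int} {vis : List (Int × Int)}
    {p0 x : Int × Int} (h : pvReach A r c vis p0 x) : pvValid A r c x ∧ x ∉ vis := by
  induction h with
  | base hv hn => exact ⟨hv, hn⟩
  | step _ _ hv hn _ => exact ⟨hv, hn⟩

lemma pvReach_congr {A : List (List String)} {r c : Int} {v1 v2 : List (Int × Int)}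
    {p0 x : Int × Int} (hv : ∀ z, z ∈ v1 ↔ z ∈ v2) (h : pvReach A r c v1 p0 x) :
    pvReach A r c v2 p0 x := by
  induction h with
  | base hval hn => exact pvReach.base hval (fun hx => hn ((hv _).mpr hx))
  | step _ hadj hval hn ih => exact pvReach.step ih hadj hval (fun hx => hn ((hv _).mpr hx))

-- ---- A-side soundness ----

lemma pvDfs_sound (A : List (List String)) (r c : Int) (vis0 : List (Int × Int)) (p0 : Int × Int) :
    ∀ (f : Nat) (i j : Int) (vis : PySem.Set (Int × Int)),
      (∀ z ∈ vis0, z ∈ vis) →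
      (∀ z ∈ vis, z ∈ vis0 ∨ pvReach A r c vis0 p0 z) →
      (pvValid A r c (i, j) → (i, j) ∉ vis0 → pvReach A r c vis0 p0 (i, j)) →
      ∀ x ∈ (pvDfs A r c f i j vis).1, x ∈ vis0 ∨ pvReach A r c vis0 p0 x := by
  intro f
  induction f with
  | zero => intro i j vis _ hv _ x hx; exact hv x hx
  | succ f ih =>
    intro i j vis hsub hv hstart x hx
    rw [pvDfs_succ] at hx
    split_ifs at hx with hg
    · exact hv x hx
    · push Not at hg
      obtain ⟨h1, h2, h3, h4, h5, h6⟩ := hg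
      have hvalid : pvValid A r c (i, j) := ⟨by omega, by omega, by omega, by omega, h6⟩
      have hreach : pvReach A r c vis0 p0 (i, j) :=
        hstart hvalid (fun hx0 => h5 (hsub _ hx0))
      have hfold : ∀ (ps : List (Int × Int)) (st : PySem.Set (Int × Int) × Int),
          (∀ p ∈ ps, pvAdj (i, j) p) →
          (∀ z ∈ vis0, z ∈ st.1) →
          (∀ z ∈ st.1, z ∈ vis0 ∨ pvReach A r c vis0 p0 z) →
          ∀ x ∈ (ps.foldl (pvStepA A r c f) st).1, x ∈ vis0 ∨ pvReach A r c vis0 p0 x := by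
        intro ps
        induction ps with
        | nil => intro st _ _ hstv x hx; exact hstv x hx
        | cons p ps ihp =>
          intro st hadj hsubst hstv x hx
          rw [List.foldl_cons] at hx
          refine ihp _ (fun q hq => hadj q (List.mem_cons_of_mem _ hq)) ?_ ?_ x hx
          · intro z hz
            exact pvDfs_mono A r c f p.1 p.2 st.1 z (hsubst z hz)
          · intro z hz
            refine ih p.1 p.2 st.1 hsubst hstv ?_ z hz
            intro hpv hp0
            exact pvReach.step hreach (hadj p (List.mem_cons_self ..)) hpv hp0
      refine hfold _ _ (fun q hq => hq) ?_ ?_ x hx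
      · intro z hz
        exact (pv_mem_add vis z (i, j)).mpr (Or.inl (hsub z hz))
      · intro z hz
        rcases (pv_mem_add vis z (i, j)).mp hz with hz | rfl
        · exact hv z hz
        · exact Or.inr hreach

-- ---- A-side closure (needs sufficient fuel) ----

lemma pvDfs_closed (A : List (List String)) (r c : Int) :
    ∀ (f : Nat) (i j : Int) (vis : PySem.Set (Int × Int)), pvUnvis r c vis < f →
      ((pvValid A r c (i, j) ∧ (i, j) ∉ vis) → (i, j) ∈ (pvDfs A r c f i j vis).1) ∧
      (∀ p ∈ (pvDfs A r c f i j vis).1, p ∉ vis →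
        ∀ q, pvAdj p q → pvValid A r c q → q ∈ (pvDfs A r c f i j vis).1) := by
  intro f
  induction f with
  | zero => intro i j vis hf; omega
  | succ f ih =>
    intro i j vis hf
    rw [pvDfs_succ]
    split_ifs with hg
    · constructor
      · rintro ⟨⟨v1, v2, v3, v4, v5⟩, hnv⟩
        exfalso
        rcases hg with h | h | h | h | h | h
        · omega
        · omega
        · omega
        · omega
        · exact hnv h
        · exact h v5
      · intro p hp hnp q _ _
        exact absurd hp hnp
    · push Not at hg
      obtain ⟨h1, h2, h3, h4, h5, h6⟩ := hg
      have hgrid : (i, j) ∈ pvGridCells r c := by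
        rw [mem_pvGridCells]
        exact ⟨by omega, by omega, by omega, by omega⟩
      have hlt : pvUnvis r c (PySem.Set.add vis (i, j)) < pvUnvis r c vis :=
        pvUnvis_add_lt r c vis (i, j) hgrid h5
      -- fold closure
      have hfold : ∀ (ps : List (Int × Int)) (st : PySem.Set (Int × Int) × Int),
          pvUnvis r c st.1 < f →
          ((∀ q ∈ ps, pvValid A r c q → q ∈ (ps.foldl (pvStepA A r c f) st).1) ∧
           (∀ x ∈ st.1, x ∈ (ps.foldl (pvStepA A r c f) st).1) ∧
           (∀ p ∈ (ps.foldl (pvStepA A r c f) st).1, p ∉ st.1 →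
             ∀ q, pvAdj p q → pvValid A r c q → q ∈ (ps.foldl (pvStepA A r c f) st).1)) := by
        intro ps
        induction ps with
        | nil =>
          intro st _
          refine ⟨?_, fun x hx => hx, ?_⟩
          · intro q hq
            cases hq
          · intro p hp hnp
            exact absurd hp hnp
        | cons a ps ihp =>
          intro st hst
          have hmono := pvDfs_mono A r c f
          set st' : PySem.Set (Int × Int) × Int := pvStepA A r c f st a with hst'
          have hsubst : ∀ x ∈ st.1, x ∈ st'.1 := by
            intro x hx
            exact hmono a.1 a.2 st.1 x hx
          have hst'lt : pvUnvis r c st'.1 < f :=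
            lt_of_le_of_lt (pvUnvis_le_of_subset r c st.1 st'.1 hsubst) hst
          have hfoldc : (a :: ps).foldl (pvStepA A r c f) st = ps.foldl (pvStepA A r c f) st' := rfl
          obtain ⟨C1, C2, C3⟩ := ihp st' hst'lt
          have iha := ih a.1 a.2 st.1 hst
          refine ⟨?_, ?_, ?_⟩
          · intro q hq hval
            rw [hfoldc]
            rcases List.mem_cons.mp hq with rfl | hq'
            · by_cases hin : q ∈ st.1
              · exact C2 q (hsubst q hin)
              · refine C2 q ?_
                have : q ∈ (pvDfs A r c f q.1 q.2 st.1).1 := iha.1 ⟨hval, hin⟩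
                exact this
            · exact C1 q hq' hval
          · intro x hx
            rw [hfoldc]
            exact C2 x (hsubst x hx)
          · intro p hp hnp q hadj hval
            rw [hfoldc] at hp ⊢
            by_cases hpin : p ∈ st'.1
            · -- p was added during the call on a
              have hpa : p ∈ (pvDfs A r c f a.1 a.2 st.1).1 := hpin
              have := iha.2 p hpa hnp q hadj hval
              exact C2 q this
            · exact C3 p hp hpin q hadj hval
      have hflt : pvUnvis r c (PySem.Set.add vis (i, j)) < f := by omega
      obtain ⟨C1, C2, C3⟩ := hfold (pvNbrsA i j) (PySem.Set.add vis (i, j), 1) hflt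
      constructor
      · intro _
        exact C2 (i, j) ((pv_mem_add _ _ _).mpr (Or.inr rfl))
      · intro p hp hnp q hadj hval
        by_cases hpij : p = (i, j)
        · subst hpij
          exact C1 q hadj hval
        · have hpn1 : p ∉ PySem.Set.add vis (i, j) := by
            rw [pv_mem_add]
            rintro (h | h)
            · exact hnp h
            · exact hpij h
          exact C3 p hp hpn1 q hadj hval

-- ---- A-side characterisation ----

lemma pvDfs_char (A : List (List String)) (r c : Int) (f : Nat) (i j : Int)
    (vis : PySem.Set (Int × Int)) (hf : pvUnvis r c vis < f) :
    ∀ x, x ∈ (pvDfs A r c f i j vis).1 ↔ x ∈ vis ∨ pvReach A r c vis (i, j) x := by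
  intro x
  constructor
  · intro hx
    refine pvDfs_sound A r c vis (i, j) f i j vis (fun z hz => hz) (fun z hz => Or.inl hz)
      ?_ x hx
    intro hval hnv
    exact pvReach.base hval hnv
  · rintro (hx | hx)
    · exact pvDfs_mono A r c f i j vis x hx
    · induction hx with
      | base hval hnv => exact (pvDfs_closed A r c f i j vis hf).1 ⟨hval, hnv⟩
      | step hr hadj hval hnv ihr =>
        rename_i p q
        have hp := pvReach_not_vis hr
        exact (pvDfs_closed A r c f i j vis hf).2 p ihr hp.2 q hadj hval

-- ---- adjacency vs the delta list ----

lemma pvDeltas_adj (x y : Int) :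
    ∀ d ∈ pvDeltas, (d.1 ≠ 0 ∨ d.2 ≠ 0) → pvAdj (x, y) (x + d.1, y + d.2) := by
  intro d hd
  simp only [pvDeltas, List.mem_cons, List.not_mem_nil, or_false] at hd
  rcases hd with rfl | rfl | rfl | rfl | rfl | rfl | rfl | rfl | rfl <;> intro h <;>
    first
      | (exfalso; rcases h with h | h <;> exact h rfl)
      | simp [pvAdj, pvNbrsA, Prod.ext_iff, sub_eq_add_neg]

lemma pvAdj_delta (x y : Int) (q : Int × Int) (h : pvAdj (x, y) q) :
    ∃ d ∈ pvDeltas, (d.1 ≠ 0 ∨ d.2 ≠ 0) ∧ q = (x + d.1, y + d.2) := by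
  simp only [pvAdj, pvNbrsA, List.mem_cons, List.not_mem_nil, or_false] at h
  obtain ⟨q1, q2⟩ := q
  simp only [Prod.mk.injEq] at h
  simp only [pvDeltas, List.mem_cons, List.not_mem_nil, or_false, Prod.ext_iff]
  rcases h with ⟨h1, h2⟩ | ⟨h1, h2⟩ | ⟨h1, h2⟩ | ⟨h1, h2⟩ | ⟨h1, h2⟩ | ⟨h1, h2⟩ | ⟨h1, h2⟩ | ⟨h1, h2⟩
  · exact ⟨(-1, 0), by simp, by simp, by omega, by omega⟩
  · exact ⟨(1, 0), by simp, by simp, by omega, by omega⟩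
  · exact ⟨(0, -1), by simp, by simp, by omega, by omega⟩
  · exact ⟨(0, 1), by simp, by simp, by omega, by omega⟩
  · exact ⟨(-1, -1), by simp, by simp, by omega, by omega⟩
  · exact ⟨(-1, 1), by simp, by simp, by omega, by omega⟩
  · exact ⟨(1, -1), by simp, by simp, by omega, by omega⟩
  · exact ⟨(1, 1), by simp, by simp, by omega, by omega⟩

-- ---- B-side push-loop lemmas ----

lemma pvPush_cases (A : List (List String)) (r c x y : Int)
    (st : PySem.Set (Int × Int) × List (Int × Int)) (d : Int × Int) :
    pvPush A r c x y st d = st ∨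
    ((d.1 ≠ 0 ∨ d.2 ≠ 0) ∧ pvValid A r c (x + d.1, y + d.2) ∧ (x + d.1, y + d.2) ∉ st.1 ∧
      pvPush A r c x y st d =
        (PySem.Set.add st.1 (x + d.1, y + d.2), (x + d.1, y + d.2) :: st.2)) := by
  unfold pvPush
  split_ifs with h1 h2
  · right
    exact ⟨h1, ⟨h2.1, h2.2.1, h2.2.2.1, h2.2.2.2.1, h2.2.2.2.2.2⟩, h2.2.2.2.2.1, rfl⟩
  · left; rfl
  · left; rfl

lemma pvPushFold_mono (A : List (List String)) (r c x y : Int) :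
    ∀ (ds : List (Int × Int)) (vis : PySem.Set (Int × Int)) (stk : List (Int × Int)) (z : Int × Int),
      z ∈ vis → z ∈ (ds.foldl (pvPush A r c x y) (vis, stk)).1 := by
  intro ds
  induction ds with
  | nil => intro vis stk z hz; exact hz
  | cons d ds ih =>
    intro vis stk z hz
    rw [List.foldl_cons]
    rcases pvPush_cases A r c x y (vis, stk) d with heq | ⟨_, _, _, heq⟩ <;> rw [heq]
    · exact ih vis stk z hz
    · exact ih _ _ z ((pv_mem_add _ _ _).mpr (Or.inl hz))

lemma pvPushFold_stk_mono (A : List (List String)) (r c x y : Int) :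
    ∀ (ds : List (Int × Int)) (vis : PySem.Set (Int × Int)) (stk : List (Int × Int)) (z : Int × Int),
      z ∈ stk → z ∈ (ds.foldl (pvPush A r c x y) (vis, stk)).2 := by
  intro ds
  induction ds with
  | nil => intro vis stk z hz; exact hz
  | cons d ds ih =>
    intro vis stk z hz
    rw [List.foldl_cons]
    rcases pvPush_cases A r c x y (vis, stk) d with heq | ⟨_, _, _, heq⟩ <;> rw [heq]
    · exact ih vis stk z hz
    · exact ih _ _ z (List.mem_cons_of_mem _ hz)

lemma pvPushFold_nodup (A : List (List String)) (r c x y : Int) :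
    ∀ (ds : List (Int × Int)) (vis : PySem.Set (Int × Int)) (stk : List (Int × Int)),
      vis.Nodup → (ds.foldl (pvPush A r c x y) (vis, stk)).1.Nodup := by
  intro ds
  induction ds with
  | nil => intro vis stk h; exact h
  | cons d ds ih =>
    intro vis stk h
    rw [List.foldl_cons]
    rcases pvPush_cases A r c x y (vis, stk) d with heq | ⟨_, _, _, heq⟩ <;> rw [heq]
    · exact ih vis stk h
    · exact ih _ _ (PySem.Set.nodup_add _ _ h)

lemma pvPushFold_len (A : List (List String)) (r c x y : Int) :
    ∀ (ds : List (Int × Int)) (vis : PySem.Set (Int × Int)) (stk : List (Int × Int)),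
      (ds.foldl (pvPush A r c x y) (vis, stk)).1.length + stk.length =
        vis.length + (ds.foldl (pvPush A r c x y) (vis, stk)).2.length := by
  intro ds
  induction ds with
  | nil => intro vis stk; rfl
  | cons d ds ih =>
    intro vis stk
    rw [List.foldl_cons]
    rcases pvPush_cases A r c x y (vis, stk) d with heq | ⟨_, _, hnm, heq⟩ <;> rw [heq]
    · exact ih vis stk
    · have := ih (PySem.Set.add vis (x + d.1, y + d.2)) ((x + d.1, y + d.2) :: stk)
      have hl := pv_length_add vis (x + d.1, y + d.2) hnm
      simp only [List.length_cons] at this ⊢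
      omega

lemma pvPushFold_stack (A : List (List String)) (r c x y : Int) :
    ∀ (ds : List (Int × Int)) (vis : PySem.Set (Int × Int)) (stk : List (Int × Int)),
      ∀ p ∈ (ds.foldl (pvPush A r c x y) (vis, stk)).2,
        p ∈ stk ∨ p ∈ (ds.foldl (pvPush A r c x y) (vis, stk)).1 := by
  intro ds
  induction ds with
  | nil => intro vis stk p hp; exact Or.inl hp
  | cons d ds ih =>
    intro vis stk p hp
    rw [List.foldl_cons] at hp ⊢
    rcases pvPush_cases A r c x y (vis, stk) d with heq | ⟨_, _, _, heq⟩ <;> rw [heq] at hp ⊢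
    · exact ih vis stk p hp
    · rcases ih _ _ p hp with hp' | hp'
      · rcases List.mem_cons.mp hp' with rfl | hp''
        · right
          exact pvPushFold_mono A r c x y ds _ _ _ ((pv_mem_add _ _ _).mpr (Or.inr rfl))
        · exact Or.inl hp''
      · exact Or.inr hp'

lemma pvPushFold_new (A : List (List String)) (r c x y : Int) :
    ∀ (ds : List (Int × Int)) (vis : PySem.Set (Int × Int)) (stk : List (Int × Int)),
      ∀ p ∈ (ds.foldl (pvPush A r c x y) (vis, stk)).1, p ∉ vis →
        p ∈ (ds.foldl (pvPush A r c x y) (vis, stk)).2 := by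
  intro ds
  induction ds with
  | nil => intro vis stk p hp hnp; exact absurd hp hnp
  | cons d ds ih =>
    intro vis stk p hp hnp
    rw [List.foldl_cons] at hp ⊢
    rcases pvPush_cases A r c x y (vis, stk) d with heq | ⟨_, _, _, heq⟩ <;> rw [heq] at hp ⊢
    · exact ih vis stk p hp hnp
    · by_cases hpv : p ∈ PySem.Set.add vis (x + d.1, y + d.2)
      · rcases (pv_mem_add _ _ _).mp hpv with h | rfl
        · exact absurd h hnp
        · exact pvPushFold_stk_mono A r c x y ds _ _ _ (List.mem_cons_self ..)
      · exact ih _ _ p hp hpv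

lemma pvPushFold_sound (A : List (List String)) (r c x y : Int) (vis0 : List (Int × Int))
    (p0 : Int × Int) (hxy : pvReach A r c vis0 p0 (x, y)) :
    ∀ (ds : List (Int × Int)), (∀ d ∈ ds, (d.1 ≠ 0 ∨ d.2 ≠ 0) → pvAdj (x, y) (x + d.1, y + d.2)) →
      ∀ (vis : PySem.Set (Int × Int)) (stk : List (Int × Int)),
      (∀ z ∈ vis0, z ∈ vis) →
      (∀ z ∈ vis, z ∈ vis0 ∨ pvReach A r c vis0 p0 z) →
      (∀ p ∈ stk, pvReach A r c vis0 p0 p) →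
      (∀ z ∈ vis0, z ∈ (ds.foldl (pvPush A r c x y) (vis, stk)).1) ∧
      (∀ z ∈ (ds.foldl (pvPush A r c x y) (vis, stk)).1, z ∈ vis0 ∨ pvReach A r c vis0 p0 z) ∧
      (∀ p ∈ (ds.foldl (pvPush A r c x y) (vis, stk)).2, pvReach A r c vis0 p0 p) := by
  intro ds
  induction ds with
  | nil => intro _ vis stk hsub hv hs; exact ⟨hsub, hv, hs⟩
  | cons d ds ih =>
    intro hadj vis stk hsub hv hs
    rw [List.foldl_cons]
    rcases pvPush_cases A r c x y (vis, stk) d with heq | ⟨hne, hval, hnm, heq⟩ <;> rw [heq]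
    · exact ih (fun e he hne => hadj e (List.mem_cons_of_mem _ he) hne) vis stk hsub hv hs
    · have hq : pvReach A r c vis0 p0 (x + d.1, y + d.2) := by
        refine pvReach.step hxy (hadj d (List.mem_cons_self ..) hne) hval ?_
        intro h0
        exact hnm (hsub _ h0)
      refine ih (fun e he hne => hadj e (List.mem_cons_of_mem _ he) hne) _ _ ?_ ?_ ?_
      · intro z hz
        exact (pv_mem_add _ _ _).mpr (Or.inl (hsub z hz))
      · intro z hz
        rcases (pv_mem_add _ _ _).mp hz with hz' | rfl
        · exact hv z hz'
        · exact Or.inr hq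
      · intro p hp
        rcases List.mem_cons.mp hp with rfl | hp'
        · exact hq
        · exact hs p hp'

lemma pvPushFold_covers (A : List (List String)) (r c x y : Int) :
    ∀ (ds : List (Int × Int)) (vis : PySem.Set (Int × Int)) (stk : List (Int × Int)),
      ∀ d ∈ ds, (d.1 ≠ 0 ∨ d.2 ≠ 0) → pvValid A r c (x + d.1, y + d.2) →
        (x + d.1, y + d.2) ∈ (ds.foldl (pvPush A r c x y) (vis, stk)).1 := by
  intro ds
  induction ds with
  | nil => intro vis stk d hd; cases hd
  | cons e ds ih =>
    intro vis stk d hd hne hval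
    rw [List.foldl_cons]
    rcases List.mem_cons.mp hd with rfl | hd'
    · -- the head delta is d itself
      by_cases hin : (x + d.1, y + d.2) ∈ vis
      · rcases pvPush_cases A r c x y (vis, stk) d with heq | ⟨_, _, _, heq⟩ <;> rw [heq]
        · exact pvPushFold_mono A r c x y ds _ _ _ hin
        · exact pvPushFold_mono A r c x y ds _ _ _ ((pv_mem_add _ _ _).mpr (Or.inl hin))
      · have heq : pvPush A r c x y (vis, stk) d =
            (PySem.Set.add vis (x + d.1, y + d.2), (x + d.1, y + d.2) :: stk) := by
          unfold pvPush
          rw [if_pos hne, if_pos]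
          exact ⟨hval.1, hval.2.1, hval.2.2.1, hval.2.2.2.1, hin, hval.2.2.2.2⟩
        rw [heq]
        exact pvPushFold_mono A r c x y ds _ _ _ ((pv_mem_add _ _ _).mpr (Or.inr rfl))
    · rcases pvPush_cases A r c x y (vis, stk) e with heq | ⟨_, _, _, heq⟩ <;> rw [heq]
      · exact ih vis stk d hd' hne hval
      · exact ih _ _ d hd' hne hval

-- ---- B-side flood-loop lemmas ----

lemma pvFlood_mono (A : List (List String)) (r c : Int) :
    ∀ (stack : List (Int × Int)) (vis : PySem.Set (Int × Int)) (size : Int) (z : Int × Int),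
      z ∈ vis → z ∈ (pvFlood A r c stack vis size).1 := by
  intro stack vis size
  induction stack, vis, size using pvFlood.induct A r c with
  | case1 vis size => intro z hz; rw [pvFlood_nil]; exact hz
  | case2 x y rest vis size st ih =>
    intro z hz
    rw [pvFlood_cons]
    exact ih z (pvPushFold_mono A r c x y pvDeltas vis rest z hz)

lemma pvFlood_nodup (A : List (List String)) (r c : Int) :
    ∀ (stack : List (Int × Int)) (vis : PySem.Set (Int × Int)) (size : Int),
      vis.Nodup → (pvFlood A r c stack vis size).1.Nodup := by
  intro stack vis size
  induction stack, vis, size using pvFlood.induct A r c with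
  | case1 vis size => intro h; rw [pvFlood_nil]; exact h
  | case2 x y rest vis size st ih =>
    intro h
    rw [pvFlood_cons]
    exact ih (pvPushFold_nodup A r c x y pvDeltas vis rest h)

lemma pvFlood_size (A : List (List String)) (r c : Int) :
    ∀ (stack : List (Int × Int)) (vis : PySem.Set (Int × Int)) (size : Int),
      ((pvFlood A r c stack vis size).1.length : Int) + size + stack.length =
        (pvFlood A r c stack vis size).2 + vis.length := by
  intro stack vis size
  induction stack, vis, size using pvFlood.induct A r c with
  | case1 vis size =>
    rw [pvFlood_nil]
    simp only [List.length_nil]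
    omega
  | case2 x y rest vis size st ih =>
    have hst : st = pvDeltas.foldl (pvPush A r c x y) (vis, rest) := rfl
    rw [hst] at ih
    rw [pvFlood_cons]
    have hlen := pvPushFold_len A r c x y pvDeltas vis rest
    simp only [List.length_cons] at ih ⊢
    omega

lemma pvFlood_sound (A : List (List String)) (r c : Int) (vis0 : List (Int × Int))
    (p0 : Int × Int) :
    ∀ (stack : List (Int × Int)) (vis : PySem.Set (Int × Int)) (size : Int),
      (∀ z ∈ vis0, z ∈ vis) →
      (∀ z ∈ vis, z ∈ vis0 ∨ pvReach A r c vis0 p0 z) →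
      (∀ p ∈ stack, pvReach A r c vis0 p0 p) →
      ∀ z ∈ (pvFlood A r c stack vis size).1, z ∈ vis0 ∨ pvReach A r c vis0 p0 z := by
  intro stack vis size
  induction stack, vis, size using pvFlood.induct A r c with
  | case1 vis size => intro _ hv _ z hz; rw [pvFlood_nil] at hz; exact hv z hz
  | case2 x y rest vis size st ih =>
    intro hsub hv hs z hz
    rw [pvFlood_cons] at hz
    have hxy : pvReach A r c vis0 p0 (x, y) := hs (x, y) (List.mem_cons_self ..)
    obtain ⟨s1, s2, s3⟩ := pvPushFold_sound A r c x y vis0 p0 hxy pvDeltas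
      (fun d hd hne => pvDeltas_adj x y d hd hne) vis rest hsub hv
      (fun p hp => hs p (List.mem_cons_of_mem _ hp))
    exact ih s1 s2 s3 z hz

lemma pvFlood_closed (A : List (List String)) (r c : Int) :
    ∀ (stack : List (Int × Int)) (vis : PySem.Set (Int × Int)) (size : Int),
      (∀ p ∈ stack, p ∈ vis) →
      ((∀ p ∈ stack, ∀ q, pvAdj p q → pvValid A r c q →
          q ∈ (pvFlood A r c stack vis size).1) ∧
       (∀ p ∈ (pvFlood A r c stack vis size).1, p ∉ vis → ∀ q, pvAdj p q → pvValid A r c q →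
          q ∈ (pvFlood A r c stack vis size).1)) := by
  intro stack vis size
  induction stack, vis, size using pvFlood.induct A r c with
  | case1 vis size =>
    intro _
    rw [pvFlood_nil]
    refine ⟨?_, ?_⟩
    · intro p hp
      cases hp
    · intro p hp hnp
      exact absurd hp hnp
  | case2 x y rest vis size st ih =>
    have hst : st = pvDeltas.foldl (pvPush A r c x y) (vis, rest) := rfl
    rw [hst] at ih
    clear hst
    intro hsv
    rw [pvFlood_cons]
    set st := pvDeltas.foldl (pvPush A r c x y) (vis, rest) with hstdef
    have hsub : ∀ z ∈ vis, z ∈ st.1 := fun z hz => pvPushFold_mono A r c x y pvDeltas vis rest z hz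
    have hstack' : ∀ p ∈ st.2, p ∈ st.1 := by
      intro p hp
      rcases pvPushFold_stack A r c x y pvDeltas vis rest p hp with h | h
      · exact hsub p (hsv p (List.mem_cons_of_mem _ h))
      · exact h
    obtain ⟨C1, C2⟩ := ih hstack'
    have hcoverxy : ∀ q, pvAdj (x, y) q → pvValid A r c q →
        q ∈ (pvFlood A r c st.2 st.1 (size + 1)).1 := by
      intro q hadj hval
      obtain ⟨d, hd, hne, rfl⟩ := pvAdj_delta x y q hadj
      exact pvFlood_mono A r c st.2 st.1 (size + 1) _
        (pvPushFold_covers A r c x y pvDeltas vis rest d hd hne hval)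
    constructor
    · intro p hp q hadj hval
      rcases List.mem_cons.mp hp with rfl | hp'
      · exact hcoverxy q hadj hval
      · exact C1 p (pvPushFold_stk_mono A r c x y pvDeltas vis rest p hp') q hadj hval
    · intro p hp hnp q hadj hval
      by_cases hin : p ∈ st.1
      · have : p ∈ st.2 := pvPushFold_new A r c x y pvDeltas vis rest p hin hnp
        exact C1 p this q hadj hval
      · exact C2 p hp hin q hadj hval

-- ---- characterisations of one component ----

lemma pvFlood_char (A : List (List String)) (r c : Int) (i j : Int)
    (vis : PySem.Set (Int × Int)) (hval : pvValid A r c (i, j)) (hnv : (i, j) ∉ vis) :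
    ∀ x, x ∈ (pvFlood A r c [(i, j)] (PySem.Set.add vis (i, j)) 0).1 ↔
      x ∈ vis ∨ pvReach A r c vis (i, j) x := by
  have hstart : ((i, j) : Int × Int) ∈ PySem.Set.add vis (i, j) :=
    (pv_mem_add _ _ _).mpr (Or.inr rfl)
  intro x
  constructor
  · intro hx
    refine pvFlood_sound A r c vis (i, j) [(i, j)] (PySem.Set.add vis (i, j)) 0 ?_ ?_ ?_ x hx
    · intro z hz
      exact (pv_mem_add _ _ _).mpr (Or.inl hz)
    · intro z hz
      rcases (pv_mem_add _ _ _).mp hz with hz' | rfl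
      · exact Or.inl hz'
      · exact Or.inr (pvReach.base hval hnv)
    · intro p hp
      rcases List.mem_cons.mp hp with rfl | hp'
      · exact pvReach.base hval hnv
      · cases hp'
  · have hsv : ∀ p ∈ [((i, j) : Int × Int)], p ∈ PySem.Set.add vis (i, j) := by
      intro p hp
      rcases List.mem_cons.mp hp with rfl | hp'
      · exact hstart
      · cases hp'
    obtain ⟨Cl1, Cl2⟩ := pvFlood_closed A r c [(i, j)] (PySem.Set.add vis (i, j)) 0 hsv
    rintro (hx | hx)
    · exact pvFlood_mono A r c _ _ _ x ((pv_mem_add _ _ _).mpr (Or.inl hx))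
    · induction hx with
      | base hv hn => exact pvFlood_mono A r c _ _ _ _ hstart
      | step hr hadj hv hn ihr =>
        rename_i p q
        by_cases hpij : p = (i, j)
        · subst hpij
          exact Cl1 _ (List.mem_cons_self ..) q hadj hv
        · have hp := pvReach_not_vis hr
          refine Cl2 p ihr ?_ q hadj hv
          rw [pv_mem_add]
          rintro (h | h)
          · exact hp.2 h
          · exact hpij h

-- same visited set and same component size for one flood/dfs from an unvisited 'o' cell
lemma pvComponent_eq (A : List (List String)) (r c : Int) (f : Nat)
    (vA vB : PySem.Set (Int × Int)) (i j : Int)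
    (hf : pvUnvis r c vA < f) (hmem : ∀ z, z ∈ vA ↔ z ∈ vB)
    (hna : vA.Nodup) (hnb : vB.Nodup)
    (hval : pvValid A r c (i, j)) (hnv : (i, j) ∉ vA) :
    (∀ z, z ∈ (pvDfs A r c f i j vA).1 ↔
        z ∈ (pvFlood A r c [(i, j)] (PySem.Set.add vB (i, j)) 0).1) ∧
    (pvDfs A r c f i j vA).2 = (pvFlood A r c [(i, j)] (PySem.Set.add vB (i, j)) 0).2 := by
  have hnvB : (i, j) ∉ vB := fun h => hnv ((hmem _).mpr h)
  have hA := pvDfs_char A r c f i j vA hf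
  have hB := pvFlood_char A r c i j vB hval hnvB
  have hmem' : ∀ z, z ∈ (pvDfs A r c f i j vA).1 ↔
      z ∈ (pvFlood A r c [(i, j)] (PySem.Set.add vB (i, j)) 0).1 := by
    intro z
    rw [hA z, hB z]
    constructor
    · rintro (h | h)
      · exact Or.inl ((hmem z).mp h)
      · exact Or.inr (pvReach_congr hmem h)
    · rintro (h | h)
      · exact Or.inl ((hmem z).mpr h)
      · exact Or.inr (pvReach_congr (fun w => (hmem w).symm) h)
  refine ⟨hmem', ?_⟩
  have hsA := pvDfs_size A r c f i j vA
  have hsB := pvFlood_size A r c [(i, j)] (PySem.Set.add vB (i, j)) 0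
  have hlB : (PySem.Set.add vB (i, j)).length = vB.length + 1 := pv_length_add vB (i, j) hnvB
  have hnA' : (pvDfs A r c f i j vA).1.Nodup := pvDfs_nodup A r c f i j vA hna
  have hnB' : (pvFlood A r c [(i, j)] (PySem.Set.add vB (i, j)) 0).1.Nodup :=
    pvFlood_nodup A r c _ _ _ (PySem.Set.nodup_add _ _ hnb)
  have hlenS : (pvDfs A r c f i j vA).1.length =
      (pvFlood A r c [(i, j)] (PySem.Set.add vB (i, j)) 0).1.length :=
    ((List.perm_ext_iff_of_nodup hnA' hnB').mpr hmem').length_eq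
  have hlenv : vA.length = vB.length :=
    ((List.perm_ext_iff_of_nodup hna hnb).mpr hmem).length_eq
  simp only [List.length_cons, List.length_nil] at hsB
  omega

-- ---- relating the two outer double loops ----

lemma pvFoldl_rel {γ α β : Type} (R : α → β → Prop) (f : α → γ → α) (g : β → γ → β) :
    ∀ (l : List γ), (∀ x ∈ l, ∀ a b, R a b → R (f a x) (g b x)) →
      ∀ a b, R a b → R (l.foldl f a) (l.foldl g b) := by
  intro l
  induction l with
  | nil => intro _ a b h; exact h
  | cons x l ih =>
    intro hstep a b h
    exact ih (fun y hy => hstep y (List.mem_cons_of_mem _ hy)) _ _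
      (hstep x (List.mem_cons_self ..) a b h)

def pvInv (sa sb : PySem.Set (Int × Int) × Int) : Prop :=
  (∀ z, z ∈ sa.1 ↔ z ∈ sb.1) ∧ sa.1.Nodup ∧ sb.1.Nodup ∧ sa.2 = sb.2 ∧ 0 ≤ sa.2

lemma pvStep_cell (A : List (List String)) (r c : Int) (F : Nat)
    (hF : ∀ vis : PySem.Set (Int × Int), pvUnvis r c vis < F)
    (i j : Int) (h1 : 0 ≤ i) (h2 : i < r) (h3 : 0 ≤ j) (h4 : j < c) :
    ∀ (sa sb : PySem.Set (Int × Int) × Int), pvInv sa sb →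
      pvInv
        (if (i, j) ∉ sa.1 then
          ((pvDfs A r c F i j sa.1).1,
            if (pvDfs A r c F i j sa.1).2 > sa.2 then (pvDfs A r c F i j sa.1).2 else sa.2)
         else sa)
        (if (i, j) ∉ sb.1 ∧ pvCell A i j = "o" then
          ((pvFlood A r c [(i, j)] (PySem.Set.add sb.1 (i, j)) 0).1,
            if (pvFlood A r c [(i, j)] (PySem.Set.add sb.1 (i, j)) 0).2 > sb.2 then
              (pvFlood A r c [(i, j)] (PySem.Set.add sb.1 (i, j)) 0).2 else sb.2)
         else sb) := by
  rintro sa sb ⟨hmem, hna, hnb, hres, hpos⟩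
  by_cases hin : (i, j) ∈ sa.1
  · have hA : ¬ ((i, j) ∉ sa.1) := fun hh => hh hin
    have hB : ¬ (((i, j) ∉ sb.1) ∧ pvCell A i j = "o") := by
      rintro ⟨hh, _⟩
      exact hh ((hmem _).mp hin)
    rw [if_neg hA, if_neg hB]
    exact ⟨hmem, hna, hnb, hres, hpos⟩
  · by_cases hcell : pvCell A i j = "o"
    · have hBc : ((i, j) ∉ sb.1) ∧ pvCell A i j = "o" :=
        ⟨fun h => hin ((hmem _).mpr h), hcell⟩
      rw [if_pos hin, if_pos hBc]
      have hval : pvValid A r c (i, j) := ⟨h1, h2, h3, h4, hcell⟩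
      obtain ⟨hm', hn'⟩ := pvComponent_eq A r c F sa.1 sb.1 i j (hF sa.1) hmem hna hnb hval hin
      refine ⟨hm', pvDfs_nodup A r c F i j sa.1 hna,
        pvFlood_nodup A r c _ _ _ (PySem.Set.nodup_add _ _ hnb), ?_, ?_⟩
      · show (if (pvDfs A r c F i j sa.1).2 > sa.2 then (pvDfs A r c F i j sa.1).2 else sa.2) =
          (if (pvFlood A r c [(i, j)] (PySem.Set.add sb.1 (i, j)) 0).2 > sb.2 then
            (pvFlood A r c [(i, j)] (PySem.Set.add sb.1 (i, j)) 0).2 else sb.2)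
        rw [hn', hres]
      · show 0 ≤ (if (pvDfs A r c F i j sa.1).2 > sa.2 then (pvDfs A r c F i j sa.1).2 else sa.2)
        split_ifs with hgt
        · omega
        · exact hpos
    · have hB : ¬ (((i, j) ∉ sb.1) ∧ pvCell A i j = "o") := by
        rintro ⟨_, h⟩
        exact hcell h
      rw [if_pos hin, if_neg hB]
      have hguard := pvDfs_guard A r c F i j sa.1
        (Or.inr (Or.inr (Or.inr (Or.inr (Or.inr hcell)))))
      rw [hguard]
      have hng : ¬ ((0 : Int) > sa.2) := by omega
      rw [if_neg hng]
      exact ⟨hmem, hna, hnb, hres, hpos⟩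

lemma pvGridCells_length (r c : Int) : (pvGridCells r c).length = r.toNat * c.toNat := by
  simp [pvGridCells]

lemma pvUnvis_le (r c : Int) (vis : List (Int × Int)) :
    pvUnvis r c vis ≤ (pvGridCells r c).length := List.countP_le_length

lemma pvOuter (A : List (List String)) (r c : Int) (F : Nat)
    (hF : ∀ vis : PySem.Set (Int × Int), pvUnvis r c vis < F) :
    pvInv
      ((PySem.List.pyRange 0 r 1).foldl (fun st i =>
        (PySem.List.pyRange 0 c 1).foldl (fun st j =>
          if (i, j) ∉ st.1 then
            ((pvDfs A r c F i j st.1).1,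
              if (pvDfs A r c F i j st.1).2 > st.2 then (pvDfs A r c F i j st.1).2 else st.2)
          else st) st) (PySem.Set.empty, 0))
      ((PySem.List.pyRange 0 r 1).foldl (fun st i =>
        (PySem.List.pyRange 0 c 1).foldl (fun st j =>
          if (i, j) ∉ st.1 ∧ pvCell A i j = "o" then
            ((pvFlood A r c [(i, j)] (PySem.Set.add st.1 (i, j)) 0).1,
              if (pvFlood A r c [(i, j)] (PySem.Set.add st.1 (i, j)) 0).2 > st.2 then
                (pvFlood A r c [(i, j)] (PySem.Set.add st.1 (i, j)) 0).2 else st.2)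
          else st) st) (PySem.Set.empty, 0)) := by
  refine pvFoldl_rel pvInv _ _ _ ?_ _ _
    ⟨fun z => Iff.rfl, List.nodup_nil, List.nodup_nil, rfl, le_refl 0⟩
  intro i hi sa sb hR
  have hib := (PySem.List.mem_pyRange_one).mp hi
  refine pvFoldl_rel pvInv _ _ _ ?_ sa sb hR
  intro j hj sa' sb' hR'
  have hjb := (PySem.List.mem_pyRange_one).mp hj
  exact pvStep_cell A r c F hF i j hib.1 hib.2 hjb.1 hjb.2 sa' sb' hR'

theorem getMaxIsland_spec : Claim_equal_getMaxIsland := by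
  unfold Claim_equal_getMaxIsland
  intro A _ _
  unfold Spec_getMaxIsland getMaxIsland getMaxIsland_alt
  split_ifs with h
  · rfl
  · have hF : ∀ vis : PySem.Set (Int × Int),
        pvUnvis (A.length : Int) ((A.headD []).length : Int) vis <
          A.length * (A.headD []).length + 1 := by
      intro vis
      have h1 := pvUnvis_le (A.length : Int) ((A.headD []).length : Int) vis
      have h2 := pvGridCells_length (A.length : Int) ((A.headD []).length : Int)
      simp only [Int.toNat_natCast] at h2
      omega
    obtain ⟨-, -, -, heq, -⟩ := pvOuter A (A.length : Int) ((A.headD []).length : Int)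
      (A.length * (A.headD []).length + 1) hF
    exact heq
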